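-- pv_equiv track=rewrite | github.com/ClaireRuysschaert/AdventOfCode2023 | DayThree/script.py | get_numbers_from_line
-- ===== SOURCE A (Python) =====
-- import string
--
-- def get_numbers_from_line(line):
--     char_position = 0
--     complete_numbers_positions = []
--     symbols_positions = []
--     while char_position < len(line):
--         char = line[char_position]
--         start_position = char_position
--         if char.isdigit():
--             complete_number = ""
--             while char.isdigit():
--                 complete_number += str(char)
--                 char_position += 1
--                 if char_position < len(line):
--                     char = line[char_position]
--             if complete_number:
--                 end_position = char_position - 1
--                 complete_numbers_positions.append(
--                     (complete_number, start_position, end_position)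
--                 )
--         elif char == "*" and char in string.punctuation:
--             symbols_positions.append((char, start_position-1, start_position+1))
--             char_position += 1
--         else:
--             char_position += 1
--     return complete_numbers_positions, symbols_positions
-- ===== SOURCE B (Python) =====
-- import re
--
-- def get_numbers_from_line(line):
--     numbers = [(m.group(), m.start(), m.end() - 1)
--                for m in re.finditer(r'[0-9]+', line)]
--     symbols = [('*', i - 1, i + 1) for i, c in enumerate(line) if c == '*']
--     return numbers, symbols
-- ===== Notes on version B (the rewrite author's own statement) =====
-- stated objective: idiomatic
-- what changed: Replaced the manual index-walking while-loop with digit accumulation by two regex/enumerate comprehensions (re.finditer for digit runs, enumerate for '*'), a constant-factor speedup since the digit-run scanning happens in the regex engine; Pre_ excludes lines ending in a digit, on which A's inner while loop never refreshes its char and loops forever (B returns the parsed lists there).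
import Mathlib
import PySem

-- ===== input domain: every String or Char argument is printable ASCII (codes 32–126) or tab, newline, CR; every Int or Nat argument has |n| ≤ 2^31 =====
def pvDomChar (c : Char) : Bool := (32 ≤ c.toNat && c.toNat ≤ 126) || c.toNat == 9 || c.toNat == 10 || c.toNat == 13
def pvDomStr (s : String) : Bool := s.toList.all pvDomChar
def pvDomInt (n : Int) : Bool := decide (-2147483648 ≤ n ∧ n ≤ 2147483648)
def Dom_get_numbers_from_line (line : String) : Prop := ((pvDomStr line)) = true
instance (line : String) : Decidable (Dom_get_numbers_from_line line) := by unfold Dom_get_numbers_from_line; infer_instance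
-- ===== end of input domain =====

-- B replaces A's manual index-walking while-loops by two independent scans (maximal digit
-- runs, then star positions) — idiomatic (regex/enumerate comprehensions in Python).

-- ===== PORT A =====
-- inner `while char.isdigit():` loop of A; the number is accumulated as List Char
-- (PySem convention: strings are proved on the List Char side), fuel makes it total
-- (fuel never runs out on inputs satisfying Pre_).
def innerA (cs : List Char) : Nat → Char → Nat → List Char → (List Char × Nat)
  | 0, _, pos, acc => (acc, pos)
  | fuel + 1, char, pos, acc =>
    if char.isDigit then
      let acc' := acc ++ [char]
      let pos' := pos + 1
      let char' := if pos' < cs.length then cs.getD pos' ' ' else char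
      innerA cs fuel char' pos' acc'
    else (acc, pos)

-- outer `while char_position < len(line):` loop of A
def outerA (cs : List Char) :
    Nat → Nat → List (String × Int × Int) → List (String × Int × Int) →
    (List (String × Int × Int)) × (List (String × Int × Int))
  | 0, _, nums, syms => (nums, syms)
  | fuel + 1, pos, nums, syms =>
    if pos < cs.length then
      let char := cs.getD pos ' '
      if char.isDigit then
        let r := innerA cs (cs.length + 1) char pos []
        let nums' := if r.1 ≠ [] then nums ++ [(String.mk r.1, (pos : Int), (r.2 : Int) - 1)] else nums
        outerA cs fuel r.2 nums' syms
      else if char = '*' ∧ "!\"#$%&'()*+,-./:;<=>?@[\\]^_`{|}~".toList.contains char then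
        outerA cs fuel (pos + 1) nums (syms ++ [(String.mk [char], (pos : Int) - 1, (pos : Int) + 1)])
      else
        outerA cs fuel (pos + 1) nums syms
    else (nums, syms)

def get_numbers_from_line (line : String) : (List (String × Int × Int)) × (List (String × Int × Int)) :=
  outerA line.toList line.toList.length 0 [] []

-- ===== PORT B =====
-- re.finditer(r'[0-9]+', line): maximal digit runs with start/end-1
def runsB : List Char → Nat → List (String × Int × Int)
  | [], _ => []
  | c :: rest, i =>
    if c.isDigit then
      let run := List.takeWhile Char.isDigit (c :: rest)
      (String.mk run, (i : Int), (i : Int) + run.length - 1) ::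
        runsB (List.dropWhile Char.isDigit rest) (i + run.length)
    else
      runsB rest (i + 1)
  termination_by cs _ => cs.length
  decreasing_by
    · simpa using Nat.lt_succ_of_le (List.length_dropWhile_le (p := Char.isDigit) (l := rest))
    · simp

-- [('*', i-1, i+1) for i, c in enumerate(line) if c == '*']
def starsB : List Char → Nat → List (String × Int × Int)
  | [], _ => []
  | c :: rest, i =>
    if c = '*' then ("*", (i : Int) - 1, (i : Int) + 1) :: starsB rest (i + 1)
    else starsB rest (i + 1)

def get_numbers_from_line_alt (line : String) : (List (String × Int × Int)) × (List (String × Int × Int)) :=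
  (runsB line.toList 0, starsB line.toList 0)

-- ===== PRECONDITION & SPEC =====
-- Pre_ excludes lines whose LAST character is a digit: there A's inner while loop never
-- refreshes `char` once char_position reaches len(line), so A loops forever (no value).
def Pre_get_numbers_from_line (line : String) : Prop :=
  (line.toList.getLast?.all (fun c => !c.isDigit)) = true
instance (line : String) : Decidable (Pre_get_numbers_from_line line) := by unfold Pre_get_numbers_from_line; infer_instance
def pvWitness_get_numbers_from_line : String := "..12*3."

def Spec_get_numbers_from_line (line : String) (out : (List (String × Int × Int)) × (List (String × Int × Int))) : Prop := out = get_numbers_from_line_alt line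
instance (line : String) (out : (List (String × Int × Int)) × (List (String × Int × Int))) : Decidable (Spec_get_numbers_from_line line out) := by unfold Spec_get_numbers_from_line; infer_instance

-- ===== CLAIM (what is proved, stated in full; the proofs are below) =====
def Claim_equal_get_numbers_from_line : Prop := ∀ (line : String), Dom_get_numbers_from_line line → Pre_get_numbers_from_line line → Spec_get_numbers_from_line line (get_numbers_from_line line)

-- ===== LEMMAS AND PROOFS =====

theorem dropWhile_eq_drop_len_takeWhile {α : Type} (p : α → Bool) :
    ∀ (l : List α), l.dropWhile p = l.drop (l.takeWhile p).length := by
  intro l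
  induction l with
  | nil => rfl
  | cons c t ih =>
    by_cases h : p c
    · simp [List.dropWhile_cons, List.takeWhile_cons, h, ih]
    · simp [List.dropWhile_cons, List.takeWhile_cons, h]

-- under Pre_, every digit run starting inside the line ends strictly before the end
theorem pre_runend (cs : List Char)
    (hPre : (cs.getLast?.all (fun c => !c.isDigit)) = true) :
    ∀ pos, pos < cs.length → pos + ((cs.drop pos).takeWhile Char.isDigit).length < cs.length := by
  intro pos hpos
  have hle : ((cs.drop pos).takeWhile Char.isDigit).length ≤ (cs.drop pos).length :=
    (List.takeWhile_prefix (p := Char.isDigit)).length_le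
  rw [List.length_drop] at hle
  rcases Nat.lt_or_ge (pos + ((cs.drop pos).takeWhile Char.isDigit).length) cs.length with h | h
  · exact h
  · exfalso
    have hlen : ((cs.drop pos).takeWhile Char.isDigit).length = (cs.drop pos).length := by
      rw [List.length_drop]; omega
    have heq : (cs.drop pos).takeWhile Char.isDigit = cs.drop pos :=
      (List.takeWhile_prefix (p := Char.isDigit)).eq_of_length hlen
    have hall : ∀ x ∈ cs.drop pos, Char.isDigit x = true := by
      intro x hx
      exact List.mem_takeWhile_imp (heq ▸ hx)
    have hne : cs.drop pos ≠ [] := by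
      intro hnil
      have := congrArg List.length hnil
      rw [List.length_drop] at this
      simp at this; omega
    have hlast : (cs.drop pos).getLast hne ∈ cs.drop pos := List.getLast_mem hne
    have hdig : Char.isDigit ((cs.drop pos).getLast hne) = true := hall _ hlast
    have hne' : cs ≠ [] := by intro h0; subst h0; simp at hpos
    have hlast2 : cs.getLast? = some ((cs.drop pos).getLast hne) := by
      rw [List.getLast?_eq_some_getLast hne', Option.some_inj]
      rw [List.getLast_drop (h := hne)]
    rw [hlast2] at hPre
    simp only [Option.all_some] at hPre
    rw [hdig] at hPre
    simp at hPre

theorem innerA_spec (cs : List Char) :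
    ∀ fuel pos acc,
      pos + ((cs.drop pos).takeWhile Char.isDigit).length < cs.length →
      cs.length - pos ≤ fuel →
      innerA cs fuel (cs.getD pos ' ') pos acc =
        (acc ++ (cs.drop pos).takeWhile Char.isDigit,
         pos + ((cs.drop pos).takeWhile Char.isDigit).length) := by
  intro fuel
  induction fuel with
  | zero =>
    intro pos acc hend hfuel
    omega
  | succ f ih =>
    intro pos acc hend hfuel
    have hpos : pos < cs.length := by omega
    have hdrop : cs.drop pos = cs.getD pos ' ' :: cs.drop (pos + 1) := by
      rw [List.getD_eq_getElem cs ' ' hpos]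
      exact (List.drop_eq_getElem_cons hpos)
    by_cases hdig : (cs.getD pos ' ').isDigit
    · have htw : (cs.drop pos).takeWhile Char.isDigit
          = cs.getD pos ' ' :: (cs.drop (pos + 1)).takeWhile Char.isDigit := by
        rw [hdrop, List.takeWhile_cons, if_pos hdig]
      have hlt : pos + 1 ≤ pos + ((cs.drop pos).takeWhile Char.isDigit).length := by
        rw [htw]; simp
      have hpos1 : pos + 1 < cs.length := by omega
      have hend1 : (pos + 1) + ((cs.drop (pos + 1)).takeWhile Char.isDigit).length < cs.length := by
        rw [htw] at hend; simp at hend; omega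
      simp only [innerA, if_pos hdig, if_pos hpos1]
      rw [ih (pos + 1) (acc ++ [cs.getD pos ' ']) hend1 (by omega)]
      rw [htw]
      simp; omega
    · have htw : (cs.drop pos).takeWhile Char.isDigit = [] := by
        rw [hdrop, List.takeWhile_cons, if_neg hdig]
      rw [htw]
      simp only [innerA]
      rw [if_neg hdig]
      simp

-- skipping an all-digit block does not change the star list
theorem starsB_skip_digits :
    ∀ (run rest : List Char) (i : Nat), (∀ c ∈ run, c.isDigit = true) →
      starsB (run ++ rest) i = starsB rest (i + run.length) := by
  intro run
  induction run with
  | nil => intro rest i _; simp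
  | cons c t ih =>
    intro rest i hall
    have hc : c.isDigit = true := hall c (by simp)
    have hne : ¬ (c = '*') := by intro h; subst h; simp [Char.isDigit] at hc
    simp only [List.cons_append, starsB, if_neg hne]
    rw [ih rest (i + 1) (fun x hx => hall x (by simp [hx]))]
    congr 1
    simp only [List.length_cons]
    omega

theorem outerA_spec (cs : List Char)
    (hPre : (cs.getLast?.all (fun c => !c.isDigit)) = true) :
    ∀ fuel pos nums syms, cs.length - pos ≤ fuel →
      outerA cs fuel pos nums syms =
        (nums ++ runsB (cs.drop pos) pos, syms ++ starsB (cs.drop pos) pos) := by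
  intro fuel
  induction fuel with
  | zero =>
    intro pos nums syms hfuel
    have hge : cs.length ≤ pos := by omega
    rw [List.drop_eq_nil_of_le hge]
    simp [outerA, runsB, starsB]
  | succ f ih =>
    intro pos nums syms hfuel
    by_cases hpos : pos < cs.length
    · have hdrop : cs.drop pos = cs.getD pos ' ' :: cs.drop (pos + 1) := by
        rw [List.getD_eq_getElem cs ' ' hpos]
        exact (List.drop_eq_getElem_cons hpos)
      by_cases hdig : (cs.getD pos ' ').isDigit
      · -- digit branch: the inner loop consumes the maximal run
        have hend := pre_runend cs hPre pos hpos
        have hinner := innerA_spec cs (cs.length + 1) pos [] hend (by omega)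
        rw [List.nil_append] at hinner
        have htw : (cs.drop pos).takeWhile Char.isDigit
            = cs.getD pos ' ' :: (cs.drop (pos + 1)).takeWhile Char.isDigit := by
          rw [hdrop, List.takeWhile_cons, if_pos hdig]
        have hrunne : (cs.drop pos).takeWhile Char.isDigit ≠ [] := by rw [htw]; simp
        have hlen1 : ((cs.drop pos).takeWhile Char.isDigit).length
            = ((cs.drop (pos + 1)).takeWhile Char.isDigit).length + 1 := by
          rw [htw]; simp
        have hdw : (cs.drop (pos + 1)).dropWhile Char.isDigit
            = cs.drop (pos + ((cs.drop pos).takeWhile Char.isDigit).length) := by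
          rw [dropWhile_eq_drop_len_takeWhile, List.drop_drop]
          congr 1
          omega
        have hruns : runsB (cs.drop pos) pos =
            (String.mk ((cs.drop pos).takeWhile Char.isDigit), (pos : Int),
              (pos : Int) + ((cs.drop pos).takeWhile Char.isDigit).length - 1) ::
            runsB (cs.drop (pos + ((cs.drop pos).takeWhile Char.isDigit).length))
              (pos + ((cs.drop pos).takeWhile Char.isDigit).length) := by
          conv_lhs => rw [hdrop]
          simp only [runsB, if_pos hdig]
          rw [← hdrop, hdw]
        have hdropsplit : cs.drop pos
            = (cs.drop pos).takeWhile Char.isDigit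
              ++ cs.drop (pos + ((cs.drop pos).takeWhile Char.isDigit).length) := by
          conv_lhs => rw [← List.takeWhile_append_dropWhile (p := Char.isDigit) (l := cs.drop pos)]
          rw [dropWhile_eq_drop_len_takeWhile, List.drop_drop]
        have hstars : starsB (cs.drop pos) pos =
            starsB (cs.drop (pos + ((cs.drop pos).takeWhile Char.isDigit).length))
              (pos + ((cs.drop pos).takeWhile Char.isDigit).length) := by
          conv_lhs => rw [hdropsplit]
          exact starsB_skip_digits _ _ pos (fun c hc => List.mem_takeWhile_imp hc)
        simp only [outerA, if_pos hpos, if_pos hdig, hinner]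
        rw [if_pos hrunne]
        rw [ih (pos + ((cs.drop pos).takeWhile Char.isDigit).length) _ _ (by omega)]
        rw [hruns, hstars]
        have hx : ((pos + ((cs.drop pos).takeWhile Char.isDigit).length : Nat) : Int) - 1
            = (pos : Int) + (((cs.drop pos).takeWhile Char.isDigit).length : Int) - 1 := by
          push_cast; ring
        rw [hx]
        simp
      · by_cases hstar : cs.getD pos ' ' = '*'
        · have hpunct : "!\"#$%&'()*+,-./:;<=>?@[\\]^_`{|}~".toList.contains (cs.getD pos ' ') := by
            rw [hstar]; decide
          simp only [outerA, if_pos hpos, if_neg hdig, if_pos (And.intro hstar hpunct)]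
          rw [ih (pos + 1) _ _ (by omega)]
          have hruns : runsB (cs.drop pos) pos = runsB (cs.drop (pos + 1)) (pos + 1) := by
            rw [hdrop]; simp only [runsB, if_neg hdig]
          have hstars : starsB (cs.drop pos) pos =
              ("*", (pos : Int) - 1, (pos : Int) + 1) :: starsB (cs.drop (pos + 1)) (pos + 1) := by
            rw [hdrop]; simp only [starsB, if_pos hstar]
          rw [hruns, hstars, hstar]
          have hm : String.mk ['*'] = "*" := rfl
          rw [hm]
          simp
        · have hcond : ¬ (cs.getD pos ' ' = '*' ∧
              "!\"#$%&'()*+,-./:;<=>?@[\\]^_`{|}~".toList.contains (cs.getD pos ' ')) := by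
            intro h; exact hstar h.1
          simp only [outerA, if_pos hpos, if_neg hdig, if_neg hcond]
          rw [ih (pos + 1) _ _ (by omega)]
          have hruns : runsB (cs.drop pos) pos = runsB (cs.drop (pos + 1)) (pos + 1) := by
            rw [hdrop]; simp only [runsB, if_neg hdig]
          have hstars : starsB (cs.drop pos) pos = starsB (cs.drop (pos + 1)) (pos + 1) := by
            rw [hdrop]; simp only [starsB, if_neg hstar]
          rw [hruns, hstars]
    · have hge : cs.length ≤ pos := by omega
      rw [List.drop_eq_nil_of_le hge]
      simp [outerA, hpos, runsB, starsB]

-- ===== VERDICT (by name: the statement is the Claim_ definition above) =====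
theorem get_numbers_from_line_spec : Claim_equal_get_numbers_from_line := by
  intro line _ hPre
  unfold Spec_get_numbers_from_line get_numbers_from_line get_numbers_from_line_alt
  rw [outerA_spec line.toList hPre line.toList.length 0 [] [] (by omega)]
  simp
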